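-- pv_equiv track=rewrite | github.com/theogom/advent-of-code | 2015/src/day11.py | has_consecutive_letters
-- ===== SOURCE A (Python) =====
-- def has_consecutive_letters(password: str, consecutive_letters: int) -> bool:
--     ords = list(map(ord, password))
--     count = 1
--
--     for i in range(len(ords) - 1):
--         if ords[i] + 1 == ords[i + 1]:
--             count += 1
--             if count == consecutive_letters:
--                 return True
--         else:
--             count = 1
--
--     return False
-- ===== SOURCE B (Python) =====
-- def has_consecutive_letters(password: str, consecutive_letters: int) -> bool:
--     # Brute-force window search: is some window of length k an increasing run?
--     k = consecutive_letters
--     if k < 2: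
--         return False
--     n = len(password)
--     return any(
--         all(ord(password[i + j]) + 1 == ord(password[i + j + 1]) for j in range(k - 1))
--         for i in range(n - k + 1)
--     )
-- ===== Notes on version B (the rewrite author's own statement) =====
-- stated objective: alternative
-- what changed: Replaces A's single-pass run counter with early return by a brute-force sliding-window search: for every start position it independently re-checks whether the whole length-k window is an increasing run (any/all over window starts), an O(n*k) algorithm instead of A's O(n) counter.
import Mathlib
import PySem

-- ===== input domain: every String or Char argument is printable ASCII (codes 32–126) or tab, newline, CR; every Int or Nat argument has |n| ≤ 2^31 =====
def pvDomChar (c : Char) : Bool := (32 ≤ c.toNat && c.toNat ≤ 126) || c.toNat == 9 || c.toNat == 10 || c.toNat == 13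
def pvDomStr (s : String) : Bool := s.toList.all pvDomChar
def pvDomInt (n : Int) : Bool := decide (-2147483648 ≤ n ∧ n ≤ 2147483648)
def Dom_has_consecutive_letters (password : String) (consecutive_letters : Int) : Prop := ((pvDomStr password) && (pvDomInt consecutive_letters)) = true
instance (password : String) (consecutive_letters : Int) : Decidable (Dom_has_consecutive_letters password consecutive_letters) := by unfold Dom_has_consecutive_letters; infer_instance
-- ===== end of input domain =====

-- B replaces A's one-pass run counter by a brute-force sliding-window search (any/all over window starts); alternative algorithm, same results.

-- ===== PORT A =====
def has_consecutive_letters (password : String) (consecutive_letters : Int) : Bool :=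
  let ords : List Int := password.toList.map (fun c => (c.toNat : Int))
  -- the loop's early `return True` is carried as the Boolean second component of the state
  ((PySem.List.pyRange 0 ((ords.length : Int) - 1) 1).foldl
    (fun (st : Int × Bool) i =>
      if st.2 then st
      else if PySem.List.pyGetD ords i 0 + 1 == PySem.List.pyGetD ords (i + 1) 0 then
        (if st.1 + 1 == consecutive_letters then (st.1 + 1, true) else (st.1 + 1, false))
      else (1, st.2))
    (1, false)).2

-- ===== PORT B =====
def has_consecutive_letters_alt (password : String) (consecutive_letters : Int) : Bool :=
  if consecutive_letters < 2 then false
  else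
    let os : List Int := password.toList.map (fun c => (c.toNat : Int))
    (PySem.List.pyRange 0 ((os.length : Int) - consecutive_letters + 1) 1).any (fun i =>
      (PySem.List.pyRange 0 (consecutive_letters - 1) 1).all (fun j =>
        PySem.List.pyGetD os (i + j) 0 + 1 == PySem.List.pyGetD os (i + j + 1) 0))

-- ===== PRECONDITION & SPEC =====
def Spec_has_consecutive_letters (password : String) (consecutive_letters : Int) (out : Bool) : Prop := out = has_consecutive_letters_alt password consecutive_letters
instance (password : String) (consecutive_letters : Int) (out : Bool) : Decidable (Spec_has_consecutive_letters password consecutive_letters out) := by unfold Spec_has_consecutive_letters; infer_instance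

-- ===== CLAIM (what is proved, stated in full; the proofs are below) =====
def Claim_equal_has_consecutive_letters : Prop := ∀ (password : String) (consecutive_letters : Int), Dom_has_consecutive_letters password consecutive_letters → Spec_has_consecutive_letters password consecutive_letters (has_consecutive_letters password consecutive_letters)

-- ===== LEMMAS AND PROOFS =====

-- A's step function over an adjacent pair (after the index loop is rephrased over pairs)
def pvStepA (cl : Int) (st : Int × Bool) (a b : Int) : Int × Bool :=
  if st.2 then st
  else if a + 1 == b then
    (if st.1 + 1 == cl then (st.1 + 1, true) else (st.1 + 1, false))
  else (1, st.2)

-- the max-streak step used as the common yardstick of both proofs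
def pvStepB (st : Int × Int) (f : Bool) : Int × Int :=
  let cur := if f then st.2 + 1 else 0
  (if cur > st.1 then cur else st.1, cur)

-- "some running streak reaches m": mirrors the cur-component of pvStepB
def pvHit : List Bool → Int → Int → Bool
  | [], _, _ => false
  | f :: t, cur, m =>
    let c := if f then cur + 1 else 0
    decide (m ≤ c) || pvHit t c m

-- window existence: some all-true window of length j ≥ 1 (credited by cur at the front) reaching m
def pvWin (fs : List Bool) (cur m : Int) : Prop :=
  ∃ i j : Nat, 1 ≤ j ∧ i + j ≤ fs.length ∧ (∀ t : Nat, t < j → fs.getD (i + t) false = true) ∧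
    m ≤ (if i = 0 then cur else 0) + (j : Int)

-- A's index loop over range(len-1) equals a fold over the list of adjacent pairs
theorem pv_idx_loop_eq_pairs {σ : Type} (f : σ → Int → Int → σ) :
    ∀ (ys xs : List Int) (k : Nat), xs.drop k = ys → ∀ (init : σ),
      (PySem.List.pyRange (k : Int) ((xs.length : Int) - 1) 1).foldl
        (fun st i => f st (PySem.List.pyGetD xs i 0) (PySem.List.pyGetD xs (i + 1) 0)) init
      = (ys.zip ys.tail).foldl (fun st p => f st p.1 p.2) init := by
  intro ys
  induction ys with
  | nil =>
    intro xs k hk init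
    have hlen : xs.length ≤ k := by
      have := congrArg List.length hk; simp at this; omega
    rw [PySem.List.pyRange_one_eq_nil (by omega)]
    simp
  | cons y t ih =>
    intro xs k hk init
    cases t with
    | nil =>
      have hlen : xs.length = k + 1 := by
        have := congrArg List.length hk; simp at this; omega
      rw [PySem.List.pyRange_one_eq_nil (by omega)]
      simp
    | cons y2 t2 =>
      have hlen : xs.length = k + (t2.length + 2) := by
        have := congrArg List.length hk; simp at this; omega
      have hk1 : (k : Int) < (xs.length : Int) - 1 := by omega
      rw [PySem.List.pyRange_one_cons hk1]
      simp only [List.foldl_cons]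
      have h1 : PySem.List.pyGetD xs (k : Int) 0 = y := by
        rw [PySem.List.pyGetD_natCast]
        have h0 : (xs.drop k)[0]? = some y := by rw [hk]; rfl
        rw [List.getElem?_drop] at h0
        simp at h0
        simp [List.getD, h0]
      have h2 : PySem.List.pyGetD xs ((k : Int) + 1) 0 = y2 := by
        have hcast : ((k : Int) + 1) = ((k + 1 : Nat) : Int) := by push_cast; ring
        rw [hcast, PySem.List.pyGetD_natCast]
        have h0 : (xs.drop k)[1]? = some y2 := by rw [hk]; rfl
        rw [List.getElem?_drop] at h0
        simp [List.getD, h0]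
      rw [h1, h2]
      have hdrop : xs.drop (k + 1) = y2 :: t2 := by
        have : xs.drop (k + 1) = (xs.drop k).drop 1 := by simp [List.drop_drop]
        rw [this, hk]; rfl
      have := ih xs (k + 1) hdrop (f init y y2)
      rw [show ((k : Int) + 1) = ((k + 1 : Nat) : Int) by push_cast; ring]
      rw [this]
      simp [List.zip]

-- once A's early-return flag is set, the state is frozen
theorem pv_stepA_frozen (cl : Int) : ∀ (ps : List (Int × Int)) (x : Int),
    ps.foldl (fun st p => pvStepA cl st p.1 p.2) (x, true) = (x, true) := by
  intro ps
  induction ps with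
  | nil => intro x; rfl
  | cons p t ih =>
    intro x
    rw [List.foldl_cons]
    have hs : pvStepA cl (x, true) p.1 p.2 = (x, true) := by simp [pvStepA]
    rw [hs]; exact ih x

-- the max-streak fold's best-so-far only grows
theorem pv_stepB_mono : ∀ (fs : List Bool) (best cur : Int),
    best ≤ (fs.foldl pvStepB (best, cur)).1 := by
  intro fs
  induction fs with
  | nil => intro best cur; simp
  | cons f t ih =>
    intro best cur
    simp only [List.foldl_cons, pvStepB]
    by_cases h : (if f then cur + 1 else 0) > best
    · simp only [if_pos h]
      exact le_trans (le_of_lt h) (ih _ _)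
    · simp only [if_neg h]; exact ih _ _

-- with a target ≤ 1 A never fires (the equality test only runs after an increment)
theorem pv_stepA_never (cl : Int) (hcl : cl ≤ 1) : ∀ (ps : List (Int × Int)) (c : Int), 1 ≤ c →
    (ps.foldl (fun st p => pvStepA cl st p.1 p.2) (c, false)).2 = false := by
  intro ps
  induction ps with
  | nil => intro c _; rfl
  | cons p t ih =>
    intro c hc
    rw [List.foldl_cons]
    by_cases h : p.1 + 1 = p.2
    · have hs : pvStepA cl (c, false) p.1 p.2 = (c + 1, false) := by
        simp [pvStepA, h, show ¬ (c + 1 = cl) by omega]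
      rw [hs]; exact ih (c + 1) (by omega)
    · have hs : pvStepA cl (c, false) p.1 p.2 = (1, false) := by
        simp [pvStepA, h]
      rw [hs]; exact ih 1 (by omega)

-- main invariant: A's running count is the max-streak fold's current streak + 1
theorem pv_main (cl : Int) : ∀ (ps : List (Int × Int)) (cur best : Int), 0 ≤ cur → best < cl - 1 → cur + 1 < cl →
    (ps.foldl (fun st p => pvStepA cl st p.1 p.2) (cur + 1, false)).2
      = decide (cl - 1 ≤ (ps.foldl (fun st f => pvStepB st ((f.2 - f.1 : Int) == 1)) (best, cur)).1) := by
  intro ps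
  induction ps with
  | nil =>
    intro cur best h0 hb hc
    simp only [List.foldl_nil]
    simp [show ¬ (cl - 1 ≤ best) by omega]
  | cons p t ih =>
    intro cur best h0 hb hc
    rw [List.foldl_cons, List.foldl_cons]
    by_cases h : p.1 + 1 = p.2
    · have hB : pvStepB (best, cur) ((p.2 - p.1 : Int) == 1)
          = (if cur + 1 > best then cur + 1 else best, cur + 1) := by
        have hf : ((p.2 - p.1 : Int) == 1) = true := by simp; omega
        simp [pvStepB, hf]
      by_cases he : cur + 1 + 1 = cl
      · have hAs : pvStepA cl (cur + 1, false) p.1 p.2 = (cur + 2, true) := by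
          simp [pvStepA, h, show cur + 1 + 1 = cl from he]; omega
        rw [hAs, hB, pv_stepA_frozen]
        have hbest : (if cur + 1 > best then cur + 1 else best) = cl - 1 := by
          rw [if_pos (by omega)]; omega
        rw [hbest]
        have hm : cl - 1 ≤ (t.foldl (fun st f => pvStepB st ((f.2 - f.1 : Int) == 1)) (cl - 1, cur + 1)).1 :=
          pv_stepB_mono (t.map (fun f => ((f.2 - f.1 : Int) == 1))) (cl - 1) (cur + 1)
            |>.trans_eq' rfl |> (fun hh => by rw [List.foldl_map] at hh; exact hh)
        simp [hm]
      · have hAs : pvStepA cl (cur + 1, false) p.1 p.2 = (cur + 1 + 1, false) := by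
          simp [pvStepA, h, he]
        rw [hAs, hB]
        have hbest : (if cur + 1 > best then cur + 1 else best) < cl - 1 := by
          split <;> omega
        exact ih (cur + 1) (if cur + 1 > best then cur + 1 else best) (by omega) hbest (by omega)
    · have hAs : pvStepA cl (cur + 1, false) p.1 p.2 = (1, false) := by
        simp [pvStepA, h]
      have hB : pvStepB (best, cur) ((p.2 - p.1 : Int) == 1)
          = (if (0 : Int) > best then 0 else best, 0) := by
        have hf : ((p.2 - p.1 : Int) == 1) = false := by simp; omega
        simp [pvStepB, hf]
      rw [hAs, hB]
      have hbest : (if (0 : Int) > best then 0 else best) < cl - 1 := by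
        split <;> omega
      have := ih 0 (if (0 : Int) > best then 0 else best) (by omega) hbest (by omega)
      simpa using this

-- A, phrased over the character list, equals "cl ≥ 2 and the maximal streak reaches cl - 1"
theorem pv_top (cs : List Char) (cl : Int) :
    ((PySem.List.pyRange 0 (((cs.map (fun c => (c.toNat : Int))).length : Int) - 1) 1).foldl
        (fun (st : Int × Bool) i =>
          pvStepA cl st (PySem.List.pyGetD (cs.map (fun c => (c.toNat : Int))) i 0)
            (PySem.List.pyGetD (cs.map (fun c => (c.toNat : Int))) (i + 1) 0)) (1, false)).2
      = (decide (2 ≤ cl) &&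
          decide (cl - 1 ≤ (((cs.zip cs.tail).map
              (fun p => ((p.2.toNat : Int) - (p.1.toNat : Int) == 1))).foldl pvStepB (0, 0)).1)) := by
  have hidx := pv_idx_loop_eq_pairs (σ := Int × Bool)
    (fun st a b => pvStepA cl st a b) (cs.map (fun c => (c.toNat : Int)))
    (cs.map (fun c => (c.toNat : Int))) 0 (by simp) (1, false)
  simp only [Nat.cast_zero] at hidx
  rw [hidx]
  have hzip : (cs.map (fun c => (c.toNat : Int))).zip (cs.map (fun c => (c.toNat : Int))).tail
      = (cs.zip cs.tail).map (fun p => ((p.1.toNat : Int), (p.2.toNat : Int))) := by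
    rw [show (cs.map (fun c => (c.toNat : Int))).tail = cs.tail.map (fun c => (c.toNat : Int))
          from List.map_tail.symm,
        List.zip_map]
    rfl
  rw [hzip, List.foldl_map, List.foldl_map]
  by_cases hcl : 2 ≤ cl
  · have hm := pv_main cl ((cs.zip cs.tail).map (fun p => ((p.1.toNat : Int), (p.2.toNat : Int))))
      0 0 le_rfl (by omega) (by omega)
    rw [List.foldl_map, List.foldl_map] at hm
    simp only [zero_add] at hm
    rw [hm]
    simp [hcl]
  · have hn := pv_stepA_never cl (by omega)
      ((cs.zip cs.tail).map (fun p => ((p.1.toNat : Int), (p.2.toNat : Int)))) 1 le_rfl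
    rw [List.foldl_map] at hn
    rw [hn]
    simp [hcl]

-- the max-streak fold reaches m iff the seed best already does, or some running streak hits m
theorem pv_fold_hit : ∀ (fs : List Bool) (best cur m : Int),
    (m ≤ (fs.foldl pvStepB (best, cur)).1 ↔ (m ≤ best ∨ pvHit fs cur m = true)) := by
  intro fs
  induction fs with
  | nil => intro best cur m; simp [pvHit]
  | cons f t ih =>
    intro best cur m
    rw [List.foldl_cons]
    have hs : pvStepB (best, cur) f
        = (if (if f then cur + 1 else 0) > best then (if f then cur + 1 else 0) else best,
           if f then cur + 1 else 0) := by simp [pvStepB]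
    rw [hs, ih]
    simp only [pvHit, Bool.or_eq_true, decide_eq_true_eq]
    by_cases hp : pvHit t (if f then cur + 1 else 0) m = true
    · simp [hp]
    · simp [hp]
      split_ifs <;> omega

-- running streaks reaching m ↔ an all-true window (front-credited by cur) reaching m
theorem pv_hit_win : ∀ (fs : List Bool) (cur m : Int), 0 ≤ cur → 1 ≤ m →
    (pvHit fs cur m = true ↔ pvWin fs cur m) := by
  intro fs
  induction fs with
  | nil =>
    intro cur m h0 h1
    simp [pvHit, pvWin]
  | cons f t ih =>
    intro cur m h0 h1
    have hc0 : (0 : Int) ≤ (if f then cur + 1 else 0) := by split <;> omega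
    simp only [pvHit, Bool.or_eq_true, decide_eq_true_eq]
    rw [ih _ _ hc0 h1]
    constructor
    · rintro (h | h)
      · -- the very next streak value already reaches m: f must be true
        have hf : f = true := by
          by_contra hf
          simp [hf] at h; omega
        subst hf
        refine ⟨0, 1, le_rfl, by simp, ?_, ?_⟩
        · intro t ht; interval_cases t; simp
        · simp at h ⊢; omega
      · obtain ⟨i, j, hj, hlen, hall, hm⟩ := h
        cases i with
        | zero =>
          cases f with
          | true =>
            refine ⟨0, j + 1, by omega, by simp at hlen ⊢; omega, ?_, ?_⟩
            · intro t ht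
              cases t with
              | zero => simp
              | succ s => simpa using hall s (by omega)
            · simp at hm ⊢; omega
          | false =>
            refine ⟨1, j, hj, by simp at hlen ⊢; omega, ?_, ?_⟩
            · intro t ht
              simpa [Nat.add_comm 1 t] using hall t ht
            · simp at hm ⊢; omega
        | succ i' =>
          refine ⟨i' + 2, j, hj, by simp at hlen ⊢; omega, ?_, ?_⟩
          · intro t ht
            have := hall t ht
            simpa [show i' + 2 + t = (i' + 1 + t) + 1 by omega, List.getD_cons_succ] using this
          · simp at hm ⊢; omega
    · rintro ⟨i, j, hj, hlen, hall, hm⟩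
      cases i with
      | zero =>
        have hf : f = true := by simpa using hall 0 hj
        subst hf
        simp only [if_pos] at hm
        cases Nat.eq_or_lt_of_le hj with
        | inl hj1 =>
          left
          have : j = 1 := hj1.symm
          subst this
          simp at hm ⊢
          omega
        | inr hj2 =>
          right
          refine ⟨0, j - 1, by omega, by simp at hlen ⊢; omega, ?_, ?_⟩
          · intro t ht
            simpa using hall (t + 1) (by omega)
          · simp only [if_pos]
            have : ((j - 1 : Nat) : Int) = (j : Int) - 1 := by omega
            rw [this]
            simp
            omega
      | succ i' =>
        right
        refine ⟨i', j, hj, by simp at hlen ⊢; omega, ?_, ?_⟩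
        · intro t ht
          simpa [show i' + 1 + t = (i' + t) + 1 by omega, List.getD_cons_succ] using hall t ht
        · have hm' : m ≤ (j : Int) := by
            simpa using hm
          split <;> omega

-- a flag of the zipped pair list, unfolded to the ord list
theorem pv_flag_getD (cs : List Char) (p : Nat) (hp : p + 1 < cs.length) :
    ((cs.zip cs.tail).map (fun q => ((q.2.toNat : Int) - (q.1.toNat : Int) == 1))).getD p false
      = ((cs.map (fun c => (c.toNat : Int))).getD p 0 + 1 == (cs.map (fun c => (c.toNat : Int))).getD (p + 1) 0) := by
  have hzl : (cs.zip cs.tail).length = cs.length - 1 := by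
    simp [List.length_zip]
  have hp' : p < (cs.zip cs.tail).length := by omega
  rw [List.getD_eq_getElem _ _ (by simpa using hp'),
      List.getD_eq_getElem _ _ (by simp; omega), List.getD_eq_getElem _ _ (by simp; omega)]
  simp only [List.getElem_map, List.getElem_zip, List.getElem_tail]
  rw [Bool.eq_iff_iff]
  simp
  omega

-- ===== VERDICT (by name: the statement is the Claim_ definition above) =====
theorem has_consecutive_letters_spec : Claim_equal_has_consecutive_letters := by
  intro password cl _
  unfold Spec_has_consecutive_letters
  have hA : has_consecutive_letters password cl
      = (decide (2 ≤ cl) &&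
          decide (cl - 1 ≤ ((((password.toList).zip (password.toList).tail).map
              (fun p => ((p.2.toNat : Int) - (p.1.toNat : Int) == 1))).foldl pvStepB (0, 0)).1)) :=
    pv_top password.toList cl
  rw [hA]
  by_cases hcl : cl < 2
  · simp [has_consecutive_letters_alt, hcl, show ¬ (2 ≤ cl) by omega]
  · have h2 : 2 ≤ cl := by omega
    simp only [has_consecutive_letters_alt, if_neg hcl]
    set cs := password.toList with hcs
    set flags := (cs.zip cs.tail).map (fun p => ((p.2.toNat : Int) - (p.1.toNat : Int) == 1)) with hflags
    have hfl : flags.length = cs.length - 1 := by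
      simp [hflags, List.length_zip]
    have h1 := pv_fold_hit flags 0 0 (cl - 1)
    have h2' := pv_hit_win flags 0 (cl - 1) le_rfl (by omega)
    rw [Bool.eq_iff_iff]
    simp only [Bool.and_eq_true, decide_eq_true_eq, List.any_eq_true]
    rw [h1, h2']
    have hwin : pvWin flags 0 (cl - 1) ↔
        (∃ i ∈ PySem.List.pyRange 0 ((((cs.map (fun c => (c.toNat : Int))).length : Int)) - cl + 1) 1,
          ((PySem.List.pyRange 0 (cl - 1) 1).all (fun j =>
            PySem.List.pyGetD (cs.map (fun c => (c.toNat : Int))) (i + j) 0 + 1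
              == PySem.List.pyGetD (cs.map (fun c => (c.toNat : Int))) (i + j + 1) 0)) = true) := by
      constructor
      · rintro ⟨i, j, hj, hlen, hall, hm⟩
        rw [ite_self] at hm
        refine ⟨(i : Int), ?_, ?_⟩
        · rw [PySem.List.mem_pyRange_one]
          refine ⟨by omega, ?_⟩
          simp only [List.length_map]
          omega
        · simp only [List.all_eq_true]
          intro j' hj'
          rw [PySem.List.mem_pyRange_one] at hj'
          obtain ⟨r, hr⟩ : ∃ r : Nat, (r : Int) = j' := ⟨j'.toNat, by omega⟩
          have hrj : r < j := by omega
          have hfr := hall r hrj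
          rw [hflags, pv_flag_getD cs (i + r) (by omega)] at hfr
          subst hr
          rw [show (i : Int) + (r : Int) = ((i + r : Nat) : Int) by push_cast; ring,
              show ((i + r : Nat) : Int) + 1 = ((i + r + 1 : Nat) : Int) by push_cast; ring]
          simp only [PySem.List.pyGetD_natCast]
          simpa using hfr
      · rintro ⟨iq, hmem, hallb⟩
        rw [PySem.List.mem_pyRange_one] at hmem
        simp only [List.length_map] at hmem
        obtain ⟨q, hq⟩ : ∃ q : Nat, (q : Int) = iq := ⟨iq.toNat, by omega⟩
        refine ⟨q, (cl - 1).toNat, by omega, by omega, ?_, ?_⟩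
        · intro t ht
          simp only [List.all_eq_true] at hallb
          have htmem : (t : Int) ∈ PySem.List.pyRange 0 (cl - 1) 1 := by
            rw [PySem.List.mem_pyRange_one]; omega
          have hct := hallb (t : Int) htmem
          rw [hflags, pv_flag_getD cs (q + t) (by omega)]
          subst hq
          rw [show (q : Int) + (t : Int) = ((q + t : Nat) : Int) by push_cast; ring,
              show ((q + t : Nat) : Int) + 1 = ((q + t + 1 : Nat) : Int) by push_cast; ring] at hct
          simp only [PySem.List.pyGetD_natCast] at hct
          simpa using hct
        · rw [ite_self]
          omega
    constructor
    · rintro ⟨-, h | h⟩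
      · omega
      · exact hwin.mp h
    · intro h
      exact ⟨h2, Or.inr (hwin.mpr h)⟩
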